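-- pv_equiv track=rewrite | github.com/corysolovewicz/git-fusion | bin/p4gf_p4filetype.py | to_base_mods
-- ===== SOURCE A (Python) =====
-- ALIASES = {
-- 	      'ctempobj' : ['binary',    'S', 'w'       ]
-- 	    , 'ctext'    : ['text',      'C'            ]
-- 	    , 'cxtext'   : ['text',      'C', 'x'       ]
-- 	    , 'ktext'    : ['text',      'k'            ]
-- 	    , 'kxtext'   : ['text',      'k', 'x'       ]
-- 	    , 'ltext'    : ['text',      'F'            ]
-- 	    , 'tempobj'  : ['binary',    'F', 'S', 'w'  ]
-- 	    , 'ubinary'  : ['binary',    'F'            ]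
-- 	    , 'uresource': ['resource',  'F'            ]
-- 	    , 'uxbinary' : ['binary',    'F', 'x'       ]
-- 	    , 'xbinary'  : ['binary',    'x'            ]
-- 	    , 'xltext'   : ['text',      'F', 'x'       ]
-- 	    , 'xtempobj' : ['binary',    'S', 'w', 'x'  ]
-- 	    , 'xtext'    : ['text',      'x'            ]
-- 	    , 'xunicode' : ['unicode',   'x'            ]
-- 	    , 'xutf16'   : ['utf16',     'x'            ]
--         }
--
-- def to_base_mods(filetype):
--     '''
--     Split a string p4filetype like "xtext" into an array of 2+ strings:
--     'text'      => ['text', '' ]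
--     "xtext"     => ['text', 'x']
--     "+x"        => ['',     'x']
--     "ktext+S10" => ['text', 'k', 'S', '1', '0']
--
--     Invalid filetypes produce undefined results.
--
--     Multi-char filetypes like +S1 become multiple elements in the returned list.
--     '''
--
--     # +S<n> works only because we tear down and rebuild our + mod chars in
--     # the same sequence. We actually treat +S10 as +S +1 +0, then rebuild
--     # that to +S10 and it just works. Phew.
--
--     # Just in case we got 'xtext+k', split off any previous mods.
--     base_mod = filetype.split('+')
--     mods = base_mod[1:]
--     base = base_mod[0]
--     if mods:
--         # Try again with just the base.
--         base_mod = to_base_mods(base)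
--         if base_mod[1]:
--             mods += base_mod[1:]
--             base = base_mod[0]
--
--     if base in ALIASES:
--         x = ALIASES[base]
--         base = x[0]
--         if mods:
--             mods += x[1:]
--         else:
--             mods = x[1:]
--
--     if mods:
--         return [ base ] + mods
--     else:
--         return [ base , '' ]
-- ===== SOURCE B (Python) =====
-- ALIASES = {
-- 	      'ctempobj' : ['binary',    'S', 'w'       ]
-- 	    , 'ctext'    : ['text',      'C'            ]
-- 	    , 'cxtext'   : ['text',      'C', 'x'       ]
-- 	    , 'ktext'    : ['text',      'k'            ]
-- 	    , 'kxtext'   : ['text',      'k', 'x'       ]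
-- 	    , 'ltext'    : ['text',      'F'            ]
-- 	    , 'tempobj'  : ['binary',    'F', 'S', 'w'  ]
-- 	    , 'ubinary'  : ['binary',    'F'            ]
-- 	    , 'uresource': ['resource',  'F'            ]
-- 	    , 'uxbinary' : ['binary',    'F', 'x'       ]
-- 	    , 'xbinary'  : ['binary',    'x'            ]
-- 	    , 'xltext'   : ['text',      'F', 'x'       ]
-- 	    , 'xtempobj' : ['binary',    'S', 'w', 'x'  ]
-- 	    , 'xtext'    : ['text',      'x'            ]
-- 	    , 'xunicode' : ['unicode',   'x'            ]
-- 	    , 'xutf16'   : ['utf16',     'x'            ]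
--         }
--
-- def to_base_mods(filetype):
--     '''Manual index scan (no split, no recursion): take the base up to the
--     first '+', then peel one whole mod segment per '+'; one alias lookup.'''
--     n = len(filetype)
--     i = 0
--     while i < n and filetype[i] != '+':
--         i += 1
--     base = filetype[:i]
--     mods = []
--     while i < n:                      # filetype[i] == '+'
--         i += 1
--         j = i
--         while j < n and filetype[j] != '+':
--             j += 1
--         mods.append(filetype[i:j])
--         i = j
--     alias = ALIASES.get(base)
--     if alias is not None:
--         base = alias[0]
--         mods += alias[1:]
--     return [base] + (mods if mods else [''])
-- ===== Notes on version B (the rewrite author's own statement) =====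
-- stated objective: alternative
-- what changed: Replaces A's split('+') plus one-level self-recursion and two alias-merge branches by a manual left-to-right index scan that peels the base and each '+' mod segment directly, followed by a single ALIASES.get lookup and one concatenation.
import Mathlib
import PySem

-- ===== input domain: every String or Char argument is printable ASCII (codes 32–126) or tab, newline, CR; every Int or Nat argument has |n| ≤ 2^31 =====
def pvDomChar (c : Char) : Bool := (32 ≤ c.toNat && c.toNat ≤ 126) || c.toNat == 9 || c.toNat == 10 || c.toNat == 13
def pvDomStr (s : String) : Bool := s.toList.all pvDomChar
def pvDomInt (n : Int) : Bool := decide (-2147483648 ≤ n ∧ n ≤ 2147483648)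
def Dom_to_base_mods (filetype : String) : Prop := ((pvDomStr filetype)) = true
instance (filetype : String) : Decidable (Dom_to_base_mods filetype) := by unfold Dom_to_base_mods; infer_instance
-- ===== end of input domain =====

-- B replaces A's split('+') + one-level self-recursion by a manual left-to-right scan that
-- peels the base and each mod segment directly; objective: alternative (same cost).

-- ===== PORT A =====
-- the ALIASES module constant (shared context of both implementations)
def ALIASES : PySem.Dict String (List String) := PySem.Dict.ofList
  [ ("ctempobj",  ["binary",   "S", "w"])
  , ("ctext",     ["text",     "C"])
  , ("cxtext",    ["text",     "C", "x"])
  , ("ktext",     ["text",     "k"])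
  , ("kxtext",    ["text",     "k", "x"])
  , ("ltext",     ["text",     "F"])
  , ("tempobj",   ["binary",   "F", "S", "w"])
  , ("ubinary",   ["binary",   "F"])
  , ("uresource", ["resource", "F"])
  , ("uxbinary",  ["binary",   "F", "x"])
  , ("xbinary",   ["binary",   "x"])
  , ("xltext",    ["text",     "F", "x"])
  , ("xtempobj",  ["binary",   "S", "w", "x"])
  , ("xtext",     ["text",     "x"])
  , ("xunicode",  ["unicode",  "x"])
  , ("xutf16",    ["utf16",    "x"])
  ]

-- reference shape of s.split('+'), used only to justify termination of A's recursion
def pvSplit : List Char → List (List Char)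
  | [] => [[]]
  | c :: rest =>
      if c = '+' then [] :: pvSplit rest
      else match pvSplit rest with
           | [] => [[c]]
           | p :: ps => (c :: p) :: ps

theorem pvSplit_ne_nil (l : List Char) : pvSplit l ≠ [] := by
  induction l with
  | nil => simp [pvSplit]
  | cons c rest ih =>
      simp only [pvSplit]
      split
      · simp
      · split <;> simp

theorem pv_go_spec (l : List Char) : ∀ (fuel : Nat) (cur : List Char) (acc : List (List Char)),
    l.length < fuel →
    PySem.Chars.splitOn.go ['+'] fuel l cur acc
      = acc.reverse ++ (cur.reverse ++ (pvSplit l).headI) :: (pvSplit l).tail := by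
  induction l with
  | nil =>
      intro fuel cur acc h
      match fuel, h with
      | fuel + 1, _ => rw [PySem.Chars.splitOn.go.eq_def]; simp [pvSplit]
  | cons c rest ih =>
      intro fuel cur acc h
      match fuel, h with
      | fuel + 1, h =>
        rw [PySem.Chars.splitOn.go.eq_def]
        simp only []
        by_cases hc : c = '+'
        · subst hc
          have hpre : List.isPrefixOf ['+'] ('+' :: rest) = true := by
            simp [List.isPrefixOf]
          rw [if_pos hpre]
          have hlen : rest.length < fuel := by
            simpa [Nat.succ_lt_succ_iff] using h
          simp only [List.length_cons, List.length_nil, List.drop_succ_cons, List.drop_zero]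
          rw [ih fuel [] (cur.reverse :: acc) hlen]
          obtain ⟨p, ps, hps⟩ : ∃ p ps, pvSplit rest = p :: ps := by
            cases hq : pvSplit rest with
            | nil => exact absurd hq (pvSplit_ne_nil rest)
            | cons p ps => exact ⟨p, ps, rfl⟩
          rw [hps]
          simp [pvSplit]
          exact hps.symm
        · have hpre : List.isPrefixOf ['+'] (c :: rest) = false := by
            simp [List.isPrefixOf]
            intro hh
            exact hc hh.symm
          rw [if_neg (by simp [hpre])]
          have hlen : rest.length < fuel := by
            simpa [Nat.succ_lt_succ_iff] using h
          rw [ih fuel (c :: cur) acc hlen]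
          simp only [pvSplit, if_neg hc]
          obtain ⟨p, ps, hps⟩ : ∃ p ps, pvSplit rest = p :: ps := by
            cases hq : pvSplit rest with
            | nil => exact absurd hq (pvSplit_ne_nil rest)
            | cons p ps => exact ⟨p, ps, rfl⟩
          rw [hps]
          simp

theorem pv_splitOn_plus (l : List Char) : PySem.Chars.splitOn l ['+'] = pvSplit l := by
  have h := pv_go_spec l (l.length + 1) [] [] (Nat.lt_succ_self _)
  obtain ⟨p, ps, hps⟩ : ∃ p ps, pvSplit l = p :: ps := by
    cases hq : pvSplit l with
    | nil => exact absurd hq (pvSplit_ne_nil l)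
    | cons p ps => exact ⟨p, ps, rfl⟩
  rw [hps] at h ⊢
  simpa [PySem.Chars.splitOn] using h

theorem pv_split?_plus (s : String) :
    (PySem.Str.split? s "+").getD [] = (pvSplit s.toList).map String.ofList := by
  simp [PySem.Str.split?, PySem.Chars.split?, pv_splitOn_plus]

theorem pvSplit_head_lt (l : List Char) (h : (pvSplit l).tail ≠ []) :
    (pvSplit l).headI.length < l.length := by
  induction l with
  | nil => simp [pvSplit] at h
  | cons c rest ih =>
      simp only [pvSplit] at h ⊢
      by_cases hc : c = '+'
      · rw [if_pos hc] at h ⊢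
        simp only [List.headI, List.length_nil, List.length_cons]
        omega
      · rw [if_neg hc] at h ⊢
        obtain ⟨p, ps, hps⟩ : ∃ p ps, pvSplit rest = p :: ps := by
          cases hq : pvSplit rest with
          | nil => exact absurd hq (pvSplit_ne_nil rest)
          | cons p ps => exact ⟨p, ps, rfl⟩
        rw [hps] at h ⊢
        simp only [List.tail_cons, List.headI, List.length_cons] at h ⊢
        have := ih (by rw [hps]; simpa using h)
        rw [hps] at this
        simp only [List.headI] at this
        omega

-- cited by port A's decreasing_by: the piece before the first '+' is shorter than the input
theorem pv_split_head_lt (s : String)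
    (h : PySem.List.slice ((PySem.Str.split? s "+").getD []) (some 1) none ≠ []) :
    (String.length ((PySem.List.pyGet? ((PySem.Str.split? s "+").getD []) 0).getD "")) < s.length := by
  rw [pv_split?_plus] at h ⊢
  obtain ⟨p, ps, hps⟩ : ∃ p ps, pvSplit s.toList = p :: ps := by
    cases hq : pvSplit s.toList with
    | nil => exact absurd hq (pvSplit_ne_nil s.toList)
    | cons p ps => exact ⟨p, ps, rfl⟩
  rw [hps] at h ⊢
  have hps' : ps ≠ [] := by
    intro hnil
    rw [hnil] at h
    simp [PySem.List.slice] at h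
  have := pvSplit_head_lt s.toList (by rw [hps]; simpa using hps')
  rw [hps] at this
  simp only [List.headI] at this
  simp only [List.map_cons, PySem.List.pyGet?, PySem.List.pyIdx?]
  norm_num
  simpa using this

def to_base_mods (filetype : String) : List String :=
  -- base_mod = filetype.split('+')   ("+" is nonempty, so split? is always some)
  let base_mod := (PySem.Str.split? filetype "+").getD []
  let mods := PySem.List.slice base_mod (some 1) none
  let base := (PySem.List.pyGet? base_mod 0).getD ""   -- base_mod[0]; split returns ≥ 1 piece, never IndexError
  let bm :=
    if _h : mods ≠ [] then
      -- base_mod = to_base_mods(base); if base_mod[1]: …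
      let base_mod := to_base_mods base
      if (PySem.List.pyGet? base_mod 1).getD "" ≠ "" then   -- result always has ≥ 2 elements, never IndexError
        ((PySem.List.pyGet? base_mod 0).getD "", mods ++ PySem.List.slice base_mod (some 1) none)
      else (base, mods)
    else (base, mods)
  let bm2 :=
    match PySem.Dict.get? ALIASES bm.1 with   -- if base in ALIASES: x = ALIASES[base]
    | some x =>
        ((PySem.List.pyGet? x 0).getD "",
         if bm.2 ≠ [] then bm.2 ++ PySem.List.slice x (some 1) none
         else PySem.List.slice x (some 1) none)
    | none => bm
  if bm2.2 ≠ [] then bm2.1 :: bm2.2 else [bm2.1, ""]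
termination_by filetype.length
decreasing_by
  all_goals exact pv_split_head_lt filetype _h

-- ===== PORT B =====
-- first while loop of Source B: advance over the base chars up to the first '+';
-- returns (base chars consumed, remaining chars, i.e. [] or a list starting with '+')
def pvSpan : List Char → List Char × List Char
  | [] => ([], [])
  | c :: r =>
      if c = '+' then ([], c :: r)
      else
        let st := pvSpan r
        (c :: st.1, st.2)

-- cited by pvMods' decreasing_by
theorem pvSpan_snd_le (l : List Char) : (pvSpan l).2.length ≤ l.length := by
  induction l with
  | nil => simp [pvSpan]
  | cons c r ih =>
      simp only [pvSpan]
      split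
      · simp
      · simpa using Nat.le_succ_of_le ih

-- outer while loop of Source B: at each '+', skip it and peel one whole segment (inner scan)
def pvMods : List Char → List (List Char)
  | [] => []
  | _ :: r =>
      let st := pvSpan r
      st.1 :: pvMods st.2
termination_by l => l.length
decreasing_by
  exact Nat.lt_succ_of_le (pvSpan_snd_le r)

def to_base_mods_alt (filetype : String) : List String :=
  let st := pvSpan filetype.toList                    -- scan up to the first '+'
  let base := String.ofList st.1                      -- base = filetype[:i]
  let mods := (pvMods st.2).map String.ofList         -- one string per peeled '+' segment
  let bm :=
    match PySem.Dict.get? ALIASES base with           -- alias = ALIASES.get(base)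
    | some al => (al.headI, mods ++ al.tail) -- base = alias[0]; mods += alias[1:]
    | none => (base, mods)
  bm.1 :: (if bm.2.isEmpty then [""] else bm.2)       -- [base] + (mods if mods else [''])

-- ===== PRECONDITION & SPEC =====
def Spec_to_base_mods (filetype : String) (out : List String) : Prop := out = to_base_mods_alt filetype
instance (filetype : String) (out : List String) : Decidable (Spec_to_base_mods filetype out) := by unfold Spec_to_base_mods; infer_instance

-- ===== CLAIM (what is proved, stated in full; the proofs are below) =====
def Claim_equal_to_base_mods : Prop := ∀ (filetype : String), Dom_to_base_mods filetype → Spec_to_base_mods filetype (to_base_mods filetype)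

-- ===== LEMMAS AND PROOFS =====
theorem pv_slice_one (l : List String) : PySem.List.slice l (some 1) none = l.tail := by
  cases l <;> simp [PySem.List.slice]

theorem pv_pyGet0 (l : List String) : (PySem.List.pyGet? l 0).getD "" = l.headI := by
  cases l <;> simp [PySem.List.pyGet?, PySem.List.pyIdx?]

-- the manual scan computes exactly the pieces of split('+')
theorem pv_split_span (l : List Char) : pvSplit l = (pvSpan l).1 :: pvMods (pvSpan l).2 := by
  induction l with
  | nil => simp [pvSplit, pvSpan, pvMods]
  | cons c r ih =>
      by_cases hc : c = '+'
      · simp only [pvSplit, pvSpan, if_pos hc, pvMods]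
        exact congrArg _ ih
      · simp only [pvSplit, pvSpan, if_neg hc]
        rw [ih]

theorem pvSplit_head_no_plus (l : List Char) : '+' ∉ (pvSplit l).headI := by
  induction l with
  | nil => simp [pvSplit]
  | cons c rest ih =>
      simp only [pvSplit]
      by_cases hc : c = '+'
      · rw [if_pos hc]; simp
      · rw [if_neg hc]
        obtain ⟨p, ps, hps⟩ : ∃ p ps, pvSplit rest = p :: ps := by
          cases hq : pvSplit rest with
          | nil => exact absurd hq (pvSplit_ne_nil rest)
          | cons p ps => exact ⟨p, ps, rfl⟩
        rw [hps] at ih ⊢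
        simp only [List.headI] at ih ⊢
        simp [Ne.symm hc, ih]

theorem pvSplit_no_plus (l : List Char) (h : '+' ∉ l) : pvSplit l = [l] := by
  induction l with
  | nil => simp [pvSplit]
  | cons c rest ih =>
      simp only [List.mem_cons, not_or] at h
      simp only [pvSplit, if_neg (Ne.symm h.1), ih h.2]

-- B restated through pvSplit (via pv_split_span), to line it up with A's split
theorem pv_alt_split (filetype : String) :
    to_base_mods_alt filetype =
      (let parts := (pvSplit filetype.toList).map String.ofList
       let bm :=
         match PySem.Dict.get? ALIASES parts.headI with
         | some al => (al.headI, parts.tail ++ al.tail)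
         | none => (parts.headI, parts.tail)
       bm.1 :: (if bm.2.isEmpty then [""] else bm.2)) := by
  rw [to_base_mods_alt, pv_split_span]
  simp

-- every alias value has ≥ 2 elements, a nonempty second element, and a base that is not itself a key
set_option maxHeartbeats 1000000 in
theorem pv_alias_facts (k : String) (x : List String) (h : PySem.Dict.get? ALIASES k = some x) :
    PySem.List.slice x (some 1) none ≠ [] ∧
    x.tail.headI ≠ "" ∧
    PySem.Dict.get? ALIASES x.headI = none := by
  have hmem := PySem.Dict.mem_items_of_get?_eq_some ALIASES h
  have hfacts : ∀ p ∈ ALIASES.items,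
      PySem.List.slice p.2 (some 1) none ≠ [] ∧
      p.2.tail.headI ≠ "" ∧
      PySem.Dict.get? ALIASES p.2.headI = none := by decide
  exact hfacts (k, x) hmem

theorem pv_pyGet1 (a : String) (l : List String) : (PySem.List.pyGet? (a :: l) 1).getD "" = l.headI := by
  cases l <;> simp [PySem.List.pyGet?, PySem.List.pyIdx?]

theorem pv_main (filetype : String) : to_base_mods filetype = to_base_mods_alt filetype := by
  rw [to_base_mods.eq_def, pv_alt_split]
  simp only [pv_split?_plus]
  obtain ⟨p, ps, hps⟩ : ∃ p ps, pvSplit filetype.toList = p :: ps := by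
    cases hq : pvSplit filetype.toList with
    | nil => exact absurd hq (pvSplit_ne_nil filetype.toList)
    | cons p ps => exact ⟨p, ps, rfl⟩
  have hp : '+' ∉ p := by
    have := pvSplit_head_no_plus filetype.toList
    rw [hps] at this
    simpa using this
  rw [hps]
  cases ps with
  | nil =>
      simp only [List.map_cons, List.map_nil, List.tail_cons, List.headI, pv_slice_one, pv_pyGet0]
      rw [dif_neg (by simp)]
      cases hal : PySem.Dict.get? ALIASES (String.ofList p) with
      | none => simp
      | some x =>
          obtain ⟨hx1, _, _⟩ := pv_alias_facts _ x hal
          rw [pv_slice_one] at hx1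
          simp [hx1, List.isEmpty_iff]
  | cons q qs =>
      have hinner : to_base_mods (String.ofList p) =
          match PySem.Dict.get? ALIASES (String.ofList p) with
          | some x => if x.tail ≠ [] then x.headI :: x.tail else [x.headI, ""]
          | none => [String.ofList p, ""] := by
        rw [to_base_mods.eq_def]
        simp only [pv_split?_plus, String.toList_ofList, pvSplit_no_plus p hp,
          List.map_cons, List.map_nil, pv_slice_one, pv_pyGet0, List.tail_cons, List.headI]
        rw [dif_neg (by simp)]
        cases hal : PySem.Dict.get? ALIASES (String.ofList p) <;>
          simp
      simp only [List.map_cons, List.tail_cons, List.headI, pv_slice_one, pv_pyGet0]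
      rw [dif_pos (by simp)]
      rw [hinner]
      cases hal : PySem.Dict.get? ALIASES (String.ofList p) with
      | none => simp [hal]
      | some x =>
          obtain ⟨hx1, hx2, hx3⟩ := pv_alias_facts _ x hal
          rw [pv_slice_one] at hx1
          simp [hx1, hx2, hx3, pv_pyGet1]
          cases x <;> rfl

-- ===== VERDICT (by name: the statement is the Claim_ definition above) =====
theorem to_base_mods_spec : Claim_equal_to_base_mods := by
  intro filetype _
  unfold Spec_to_base_mods
  exact pv_main filetype
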